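-- pv_equiv track=rewrite | github.com/elamathyramanan15/python_program | smallest_string.py | lexicographically_smallest_string
-- ===== SOURCE A (Python) =====
-- def lexicographically_smallest_string(s: str, k: int) -> str:
--     n = len(s)
--     t = list(s)
--
--     for i in range(n):
--         cost = min(abs(ord(t[i]) - ord('a')), 26 - abs(ord(t[i]) - ord('a')))
--         if k >= cost:
--             t[i] = 'a'
--             k -= cost
--         else:
--             break
--
--     return ''.join(t)
-- ===== SOURCE B (Python) =====
-- def lexicographically_smallest_string(s: str, k: int) -> str:
--     # Divide and conquer: solve(seg, budget) returns (L, c) where L is how many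
--     # leading chars of seg become 'a' within budget, and c is the full cost of
--     # seg (only meaningful when L == len(seg), the only case callers use it).
--     def solve(seg, budget):
--         if not seg:
--             return 0, 0
--         if len(seg) == 1:
--             d = abs(ord(seg) - ord('a'))
--             c = min(d, 26 - d)
--             return (1, c) if c <= budget else (0, 0)
--         m = len(seg) // 2
--         left_len, left_cost = solve(seg[:m], budget)
--         if left_len < m:
--             return left_len, 0
--         right_len, right_cost = solve(seg[m:], budget - left_cost)
--         return m + right_len, left_cost + right_cost
--
--     L, _ = solve(s, k)
--     return 'a' * L + s[L:]
-- ===== Notes on version B (the rewrite author's own statement) =====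
-- stated objective: alternative
-- what changed: Replaces A's single left-to-right mutate-in-place loop with break by a divide-and-conquer recursion: split the string in half, solve each half returning (prefix length turned to 'a', segment cost), combine by advancing into the right half only when the whole left half was affordable, then return 'a'*L + s[L:].
import Mathlib
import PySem

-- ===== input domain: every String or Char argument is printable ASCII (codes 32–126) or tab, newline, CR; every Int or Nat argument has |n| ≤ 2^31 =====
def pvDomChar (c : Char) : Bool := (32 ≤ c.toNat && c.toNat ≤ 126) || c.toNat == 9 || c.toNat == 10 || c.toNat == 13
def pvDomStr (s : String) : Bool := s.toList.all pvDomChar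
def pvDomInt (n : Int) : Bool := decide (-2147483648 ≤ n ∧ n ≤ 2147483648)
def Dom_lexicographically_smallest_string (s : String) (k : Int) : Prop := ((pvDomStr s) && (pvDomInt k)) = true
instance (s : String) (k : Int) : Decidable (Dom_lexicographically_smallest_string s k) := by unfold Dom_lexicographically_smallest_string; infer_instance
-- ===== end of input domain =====

-- B replaces A's left-to-right mutate-with-break loop by a divide-and-conquer recursion on string halves (alternative decomposition, same result).

-- ===== PORT A =====
-- A's loop over range(n) mutating t in place and breaking, as structural recursion on the char list with the remaining budget k.
def pvGoA : List Char → Int → List Char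
  | [], _ => []
  | c :: rest, k =>
    let d : Int := |(c.toNat : Int) - 97|
    let cost := min d (26 - d)
    if k ≥ cost then 'a' :: pvGoA rest (k - cost) else c :: rest

def lexicographically_smallest_string (s : String) (k : Int) : String :=
  String.ofList (pvGoA s.toList k)

-- ===== PORT B =====
-- Source B's solve(seg, budget): divide and conquer on the segment, returning
-- (number of leading chars turned to 'a', full cost of the segment — used only when the whole segment was affordable).
def pvSolve : Nat → List Char → Int → Nat × Int
  | _, [], _ => (0, 0)
  | _, [c], budget =>
      let d : Int := |(c.toNat : Int) - 97|
      let cst := min d (26 - d)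
      if cst ≤ budget then (1, cst) else (0, 0)
  | 0, _ :: _ :: _, _ => (0, 0)  -- fuel guard only; never reached when fuel ≥ length
  | fuel + 1, c1 :: c2 :: rest, budget =>
      let seg := c1 :: c2 :: rest
      let m := seg.length / 2
      let p := pvSolve fuel (seg.take m) budget
      if p.1 < m then (p.1, 0)
      else
        let q := pvSolve fuel (seg.drop m) (budget - p.2)
        (m + q.1, p.2 + q.2)

def lexicographically_smallest_string_alt (s : String) (k : Int) : String :=
  let L := (pvSolve s.toList.length s.toList k).1
  String.ofList (List.replicate L 'a' ++ s.toList.drop L)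

-- ===== PRECONDITION & SPEC =====
def Spec_lexicographically_smallest_string (s : String) (k : Int) (out : String) : Prop := out = lexicographically_smallest_string_alt s k
instance (s : String) (k : Int) (out : String) : Decidable (Spec_lexicographically_smallest_string s k out) := by unfold Spec_lexicographically_smallest_string; infer_instance

-- ===== CLAIM (what is proved, stated in full; the proofs are below) =====
def Claim_equal_lexicographically_smallest_string : Prop := ∀ (s : String) (k : Int), Dom_lexicographically_smallest_string s k → Spec_lexicographically_smallest_string s k (lexicographically_smallest_string s k)

-- ===== LEMMAS AND PROOFS =====

-- Proof-side characterisation: the cutoff (first unaffordable position) and the total cost of a segment.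
def pvCost (c : Char) : Int :=
  let d : Int := |(c.toNat : Int) - 97|
  min d (26 - d)

def pvCut : List Char → Int → Nat
  | [], _ => 0
  | c :: rest, k => if pvCost c ≤ k then pvCut rest (k - pvCost c) + 1 else 0

def pvTotal (xs : List Char) : Int := (xs.map pvCost).sum

theorem pvCut_le_length (xs : List Char) (k : Int) : pvCut xs k ≤ xs.length := by
  induction xs generalizing k with
  | nil => simp [pvCut]
  | cons c rest ih =>
    simp only [pvCut, List.length_cons]
    split
    · exact Nat.succ_le_succ (ih _)
    · omega

theorem pvCut_append (l r : List Char) (k : Int) :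
    pvCut (l ++ r) k =
      if pvCut l k < l.length then pvCut l k else l.length + pvCut r (k - pvTotal l) := by
  induction l generalizing k with
  | nil => simp [pvCut, pvTotal]
  | cons c l' ih =>
    simp only [List.cons_append, pvCut, List.length_cons]
    by_cases hc : pvCost c ≤ k
    · rw [if_pos hc, if_pos hc, ih]
      by_cases h1 : pvCut l' (k - pvCost c) < l'.length
      · rw [if_pos h1, if_pos (by omega)]
      · rw [if_neg h1, if_neg (by have := pvCut_le_length l' (k - pvCost c); omega)]
        have : k - pvCost c - pvTotal l' = k - pvTotal (c :: l') := by
          simp [pvTotal]; ring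
        rw [this]; omega
    · rw [if_neg hc, if_neg hc, if_pos (by omega)]

-- pvSolve computes the cutoff, and on a fully affordable segment also its total cost.
theorem pvSolve_spec (n : Nat) : ∀ (xs : List Char), xs.length ≤ n → ∀ k : Int,
    (pvSolve n xs k).1 = pvCut xs k ∧ (pvCut xs k = xs.length → (pvSolve n xs k).2 = pvTotal xs) := by
  induction n with
  | zero =>
    intro xs h k
    have : xs = [] := List.eq_nil_of_length_eq_zero (by omega)
    subst this
    simp [pvSolve, pvCut, pvTotal]
  | succ n ih =>
    intro xs h k
    match xs with
    | [] => simp [pvSolve, pvCut, pvTotal]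
    | [c] =>
      simp only [pvSolve, pvCut, pvTotal, List.map, List.sum_cons, List.sum_nil, List.length_cons,
        List.length_nil, pvCost]
      by_cases hc : min |(c.toNat : Int) - 97| (26 - |(c.toNat : Int) - 97|) ≤ k
      · simp [hc]
      · simp [hc]
    | c1 :: c2 :: rest =>
      have hlen : (c1 :: c2 :: rest).length = rest.length + 2 := by simp
      set seg := c1 :: c2 :: rest with hseg
      have hsl : seg.length = rest.length + 2 := hlen
      set m := seg.length / 2 with hm
      have hm1 : 1 ≤ m := by omega
      have hmlt : m < seg.length := by omega
      have htl : (seg.take m).length = m := by simp [List.length_take]; omega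
      have hdl : (seg.drop m).length = seg.length - m := by simp [List.length_drop]
      have ihL := ih (seg.take m) (by omega) k
      have hunfold : pvSolve (n + 1) seg k =
          (let p := pvSolve n (seg.take m) k
           if p.1 < m then (p.1, 0)
           else
             let q := pvSolve n (seg.drop m) (k - p.2)
             (m + q.1, p.2 + q.2)) := by
        rw [hseg]; rw [pvSolve]
      have hsplit : seg = seg.take m ++ seg.drop m := (List.take_append_drop m seg).symm
      have hcutapp : pvCut seg k =
          if pvCut (seg.take m) k < (seg.take m).length then pvCut (seg.take m) k
          else (seg.take m).length + pvCut (seg.drop m) (k - pvTotal (seg.take m)) := by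
        conv_lhs => rw [hsplit]
        exact pvCut_append _ _ k
      by_cases hlt : (pvSolve n (seg.take m) k).1 < m
      · -- left half not fully affordable
        have hcutl : pvCut (seg.take m) k < m := by rw [← ihL.1]; exact hlt
        constructor
        · rw [hunfold]; simp only [hlt, if_pos]
          rw [hcutapp, htl, if_pos hcutl, ihL.1]
        · intro hfull
          exfalso
          rw [hcutapp, htl, if_pos hcutl] at hfull
          omega
      · -- left half fully affordable: pvCut (take m) k = m
        have hcutl : pvCut (seg.take m) k = m := by
          have := pvCut_le_length (seg.take m) k
          rw [htl] at this
          rw [← ihL.1]; rw [← ihL.1] at this; omega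
        have hcost : (pvSolve n (seg.take m) k).2 = pvTotal (seg.take m) :=
          ihL.2 (by rw [htl]; exact hcutl)
        have ihR := ih (seg.drop m) (by omega) (k - pvTotal (seg.take m))
        rw [hunfold]
        simp only [hlt, ite_false]
        rw [hcutapp, htl, if_neg (by omega), hcost]
        constructor
        · rw [ihR.1]
        · intro hfull
          have hrfull : pvCut (seg.drop m) (k - pvTotal (seg.take m)) = (seg.drop m).length := by
            rw [hdl]; omega
          rw [ihR.2 hrfull]
          have : pvTotal seg = pvTotal (seg.take m) + pvTotal (seg.drop m) := by
            conv_lhs => rw [hsplit]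
            simp [pvTotal]
          omega

-- A's loop produces exactly 'a' * cutoff ++ the untouched suffix.
theorem pvGoA_eq (xs : List Char) (k : Int) :
    pvGoA xs k = List.replicate (pvCut xs k) 'a' ++ xs.drop (pvCut xs k) := by
  induction xs generalizing k with
  | nil => rfl
  | cons c rest ih =>
    simp only [pvGoA, pvCut]
    by_cases hc : pvCost c ≤ k
    · have : k ≥ min |(c.toNat : Int) - 97| (26 - |(c.toNat : Int) - 97|) := by
        simpa [pvCost] using hc
      rw [if_pos this, if_pos hc, ih]
      simp [pvCost, List.replicate_succ]
    · have : ¬ k ≥ min |(c.toNat : Int) - 97| (26 - |(c.toNat : Int) - 97|) := by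
        simpa [pvCost] using hc
      rw [if_neg this, if_neg hc]
      simp

-- ===== VERDICT (by name: the statement is the Claim_ definition above) =====
theorem lexicographically_smallest_string_spec : Claim_equal_lexicographically_smallest_string := by
  intro s k _
  unfold Spec_lexicographically_smallest_string lexicographically_smallest_string lexicographically_smallest_string_alt
  rw [pvGoA_eq, (pvSolve_spec s.toList.length s.toList le_rfl k).1]
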